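-- pv_equiv track=rewrite | github.com/JasperZebra/AVATAR-Save-Editor | missions_manager.py | _get_mission_category
-- ===== SOURCE A (Python) =====
-- def _get_mission_category(mission_name):
--     """Determine mission category based on name"""
--     name_lower = mission_name.lower()
--
--     if any(keyword in name_lower for keyword in ['story', 'harmonic', 'song', 'search', 'ancient']):
--         return "Story"
--     elif any(keyword in name_lower for keyword in ['assault', 'combat', 'defense', 'attack', 'weapons', 'training']):
--         return "Combat"
--     elif any(keyword in name_lower for keyword in ['research', 'analysis', 'study', 'survey', 'specimen', 'science']):
--         return "Research"
--     elif any(keyword in name_lower for keyword in ['escort', 'transport', 'delivery', 'convoy']):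
--         return "Transport"
--     elif any(keyword in name_lower for keyword in ['patrol', 'reconnaissance', 'scout']):
--         return "Reconnaissance"
--     else:
--         return "General"
-- ===== SOURCE B (Python) =====
-- _KW_RANK = {
--     'story': 0, 'harmonic': 0, 'song': 0, 'search': 0, 'ancient': 0,
--     'assault': 1, 'combat': 1, 'defense': 1, 'attack': 1, 'weapons': 1, 'training': 1,
--     'research': 2, 'analysis': 2, 'study': 2, 'survey': 2, 'specimen': 2, 'science': 2,
--     'escort': 3, 'transport': 3, 'delivery': 3, 'convoy': 3,
--     'patrol': 4, 'reconnaissance': 4, 'scout': 4,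
-- }
-- _CATS = ["Story", "Combat", "Research", "Transport", "Reconnaissance", "General"]
--
-- def _get_mission_category(mission_name):
--     """Single left-to-right scan: at each position, see which keywords start
--     there and keep the best (lowest-rank) category seen anywhere."""
--     s = mission_name.lower()
--     best = 5
--     for i in range(len(s)):
--         for kw, rank in _KW_RANK.items():
--             if rank < best and s.startswith(kw, i):
--                 best = rank
--     return _CATS[best]
-- ===== Notes on version B (the rewrite author's own statement) =====
-- stated objective: alternative
-- what changed: Instead of A's category-major chain of any(kw in name) substring searches, B makes a single left-to-right scan over the lowered string, testing at each position which keywords start there (startswith) and keeping the minimum category rank in an accumulator, then indexes a category table by that rank.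
import Mathlib
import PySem

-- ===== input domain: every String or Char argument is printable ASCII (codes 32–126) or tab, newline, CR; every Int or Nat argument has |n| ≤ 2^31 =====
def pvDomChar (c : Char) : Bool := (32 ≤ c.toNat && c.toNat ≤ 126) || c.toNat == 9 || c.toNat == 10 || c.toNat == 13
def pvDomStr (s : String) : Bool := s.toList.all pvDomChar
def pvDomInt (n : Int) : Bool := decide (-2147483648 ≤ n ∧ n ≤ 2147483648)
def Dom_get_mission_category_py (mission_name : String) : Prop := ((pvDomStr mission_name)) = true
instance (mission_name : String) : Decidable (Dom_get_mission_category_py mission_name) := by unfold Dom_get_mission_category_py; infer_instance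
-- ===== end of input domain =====

-- B: instead of A's per-category any(kw in name) chain, B makes ONE left-to-right scan over the
-- lowered string, checking at each position which keywords start there and keeping the lowest
-- category rank seen; alternative algorithm, same exact result.


-- ===== PORT A =====
def get_mission_category_py (mission_name : String) : String :=
  let name_lower := PySem.Str.lower mission_name
  if (["story", "harmonic", "song", "search", "ancient"].any (fun k => PySem.Str.isIn k name_lower)) then "Story"
  else if (["assault", "combat", "defense", "attack", "weapons", "training"].any (fun k => PySem.Str.isIn k name_lower)) then "Combat"
  else if (["research", "analysis", "study", "survey", "specimen", "science"].any (fun k => PySem.Str.isIn k name_lower)) then "Research"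
  else if (["escort", "transport", "delivery", "convoy"].any (fun k => PySem.Str.isIn k name_lower)) then "Transport"
  else if (["patrol", "reconnaissance", "scout"].any (fun k => PySem.Str.isIn k name_lower)) then "Reconnaissance"
  else "General"

-- ===== PORT B =====
-- keyword → category rank (the dict _KW_RANK, insertion order)
def pvKwRank : List (String × Nat) :=
  [("story", 0), ("harmonic", 0), ("song", 0), ("search", 0), ("ancient", 0),
   ("assault", 1), ("combat", 1), ("defense", 1), ("attack", 1), ("weapons", 1), ("training", 1),
   ("research", 2), ("analysis", 2), ("study", 2), ("survey", 2), ("specimen", 2), ("science", 2),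
   ("escort", 3), ("transport", 3), ("delivery", 3), ("convoy", 3),
   ("patrol", 4), ("reconnaissance", 4), ("scout", 4)]

def pvCats : List String := ["Story", "Combat", "Research", "Transport", "Reconnaissance", "General"]

-- one scan over the string: at each position i, s.startswith(kw, i) updates the best rank.
-- (_CATS[best] ported as getD: best ≤ 5 always, so the default is never taken)
def get_mission_category_py_alt (mission_name : String) : String :=
  let s := (PySem.Str.lower mission_name).toList
  let best := (List.range s.length).foldl
    (fun best i => pvKwRank.foldl
      (fun b p => if p.2 < b ∧ PySem.Chars.startswith (List.drop i s) p.1.toList then p.2 else b) best) 5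
  pvCats.getD best "General"

-- ===== PRECONDITION & SPEC =====
def Spec_get_mission_category_py (mission_name : String) (out : String) : Prop := out = get_mission_category_py_alt mission_name
instance (mission_name : String) (out : String) : Decidable (Spec_get_mission_category_py mission_name out) := by unfold Spec_get_mission_category_py; infer_instance

-- ===== CLAIM (what is proved, stated in full; the proofs are below) =====
def Claim_equal_get_mission_category_py : Prop := ∀ (mission_name : String), Dom_get_mission_category_py mission_name → Spec_get_mission_category_py mission_name (get_mission_category_py mission_name)

-- ===== LEMMAS AND PROOFS =====

-- B's inner-loop step is "conditional min"
lemma pvStep_eq (s : List Char) (i b : Nat) (p : String × Nat) :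
    (if p.2 < b ∧ PySem.Chars.startswith (List.drop i s) p.1.toList then p.2 else b)
    = if PySem.Chars.startswith (List.drop i s) p.1.toList then min b p.2 else b := by
  by_cases hs : PySem.Chars.startswith (List.drop i s) p.1.toList <;>
    by_cases hr : p.2 < b <;> simp [hs, hr] <;> omega

-- generic facts about a "conditional min" fold
lemma foldl_minIf_le_init {α : Type} (c : α → Bool) (g : α → Nat) (l : List α) (b : Nat) :
    l.foldl (fun b x => if c x then min b (g x) else b) b ≤ b := by
  induction l generalizing b with
  | nil => simp
  | cons x l ih =>
    simp only [List.foldl_cons]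
    split <;> [exact le_trans (ih _) (by omega); exact ih b]

lemma foldl_minIf_le_of_mem {α : Type} (c : α → Bool) (g : α → Nat) (l : List α) (b : Nat)
    (x : α) (hx : x ∈ l) (hc : c x = true) :
    l.foldl (fun b x => if c x then min b (g x) else b) b ≤ g x := by
  induction l generalizing b with
  | nil => cases hx
  | cons y l ih =>
    simp only [List.foldl_cons]
    rcases List.mem_cons.mp hx with rfl | hx'
    · simp only [hc, if_true]
      exact le_trans (foldl_minIf_le_init c g l _) (by omega)
    · split <;> exact ih _ hx'

lemma le_foldl_minIf {α : Type} (c : α → Bool) (g : α → Nat) (l : List α) (b r : Nat)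
    (hb : r ≤ b) (h : ∀ x ∈ l, c x = true → r ≤ g x) :
    r ≤ l.foldl (fun b x => if c x then min b (g x) else b) b := by
  induction l generalizing b with
  | nil => simpa
  | cons x l ih =>
    simp only [List.foldl_cons]
    by_cases hc : c x = true
    · simp only [hc, if_true]
      exact ih _ (le_min hb (h x List.mem_cons_self hc)) (fun y hy => h y (List.mem_cons_of_mem _ hy))
    · simp only [hc]
      exact ih _ hb (fun y hy => h y (List.mem_cons_of_mem _ hy))

-- the nested loop as one fold over (position, keyword) pairs
def pvPairs (s : List Char) : List (Nat × (String × Nat)) :=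
  (List.range s.length).flatMap (fun i => pvKwRank.map (fun p => (i, p)))

def pvBest (s : List Char) : Nat :=
  (pvPairs s).foldl
    (fun b q => if PySem.Chars.startswith (List.drop q.1 s) q.2.1.toList then min b q.2.2 else b) 5

lemma best_eq (s : List Char) :
    (List.range s.length).foldl
      (fun best i => pvKwRank.foldl
        (fun b p => if p.2 < b ∧ PySem.Chars.startswith (List.drop i s) p.1.toList then p.2 else b) best) 5
    = pvBest s := by
  unfold pvBest pvPairs
  rw [List.foldl_flatMap]
  refine PySem.List.foldl_congr_mem _ _ _ _ ?_
  intro b i _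
  rw [List.foldl_map]
  refine PySem.List.foldl_congr_mem _ _ _ _ ?_
  intro b p _
  exact pvStep_eq s i b p

-- a keyword of pvKwRank is never empty
lemma pvKwRank_ne_nil : ∀ p ∈ pvKwRank, p.1.toList ≠ [] := by decide

-- matching somewhere in the scan ↔ Python's `kw in s`
lemma match_iff (s : List Char) (p : String × Nat) (hp : p.1.toList ≠ []) :
    (∃ i ∈ List.range s.length, PySem.Chars.startswith (List.drop i s) p.1.toList = true)
    ↔ PySem.Chars.isIn p.1.toList s = true := by
  constructor
  · rintro ⟨i, _, hst⟩
    exact (PySem.Chars.exists_prefix_drop_iff_isIn _ _).mp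
      ⟨i, (PySem.Chars.startswith_iff _ _).mp hst⟩
  · intro h
    obtain ⟨j, hj⟩ := (PySem.Chars.exists_prefix_drop_iff_isIn _ _).mpr h
    by_cases hlt : j < s.length
    · exact ⟨j, List.mem_range.mpr hlt, (PySem.Chars.startswith_iff _ _).mpr hj⟩
    · exfalso
      rw [List.drop_eq_nil_of_le (by omega)] at hj
      exact hp (List.prefix_nil.mp hj)

-- rank r matches some keyword (B's view)
def pvM (s : List Char) (r : Nat) : Prop :=
  ∃ p ∈ pvKwRank, p.2 = r ∧ PySem.Chars.isIn p.1.toList s = true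

lemma pvBest_le (s : List Char) (r : Nat) (h : pvM s r) : pvBest s ≤ r := by
  obtain ⟨p, hp, hr, hin⟩ := h
  obtain ⟨i, hi, hst⟩ := (match_iff s p (pvKwRank_ne_nil p hp)).mpr hin
  have hmem : (i, p) ∈ pvPairs s := by
    unfold pvPairs
    exact List.mem_flatMap.mpr ⟨i, hi, List.mem_map.mpr ⟨p, hp, rfl⟩⟩
  have := foldl_minIf_le_of_mem
    (fun q : Nat × (String × Nat) => PySem.Chars.startswith (List.drop q.1 s) q.2.1.toList)
    (fun q => q.2.2) (pvPairs s) 5 (i, p) hmem hst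
  simpa [pvBest, hr] using this

lemma le_pvBest (s : List Char) (r : Nat) (hr : r ≤ 5) (h : ∀ r' < r, ¬ pvM s r') :
    r ≤ pvBest s := by
  refine le_foldl_minIf _ _ _ _ _ hr (fun q hq hc => ?_)
  have hq' : ∃ i, i < s.length ∧ ∃ p ∈ pvKwRank, (i, p) = q := by
    simpa [pvPairs, List.mem_flatMap, List.mem_map, List.mem_range] using hq
  obtain ⟨i, hi, p, hp, heq⟩ := hq'
  subst heq
  show r ≤ p.2
  by_contra hlt
  exact h p.2 (by omega) ⟨p, hp, rfl,
    (match_iff s p (pvKwRank_ne_nil p hp)).mp ⟨i, List.mem_range.mpr hi, hc⟩⟩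

-- A's per-category keyword list is exactly the rank-r slice of pvKwRank, so its any ↔ pvM
lemma any_iff_M (s : List Char) (r : Nat) (lst : List String)
    (hl : lst = (pvKwRank.filter (fun p => p.2 == r)).map Prod.fst) :
    (lst.any (fun k => PySem.Chars.isIn k.toList s)) = true ↔ pvM s r := by
  subst hl
  simp only [pvM, List.any_eq_true, List.mem_map, List.mem_filter, beq_iff_eq]
  constructor
  · rintro ⟨k, ⟨p, ⟨hp, hr⟩, rfl⟩, hin⟩
    exact ⟨p, hp, hr, hin⟩
  · rintro ⟨p, hp, hr, hin⟩
    exact ⟨p.1, ⟨p, ⟨hp, hr⟩, rfl⟩, hin⟩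

lemma pvBest_le_five (s : List Char) : pvBest s ≤ 5 :=
  foldl_minIf_le_init _ _ _ _

-- A's if/elif chain, on the char-list level, equals indexing pvCats by the best rank
lemma pvChain_eq (s : List Char) :
    (if (["story", "harmonic", "song", "search", "ancient"].any (fun k => PySem.Chars.isIn k.toList s)) then "Story"
     else if (["assault", "combat", "defense", "attack", "weapons", "training"].any (fun k => PySem.Chars.isIn k.toList s)) then "Combat"
     else if (["research", "analysis", "study", "survey", "specimen", "science"].any (fun k => PySem.Chars.isIn k.toList s)) then "Research"
     else if (["escort", "transport", "delivery", "convoy"].any (fun k => PySem.Chars.isIn k.toList s)) then "Transport"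
     else if (["patrol", "reconnaissance", "scout"].any (fun k => PySem.Chars.isIn k.toList s)) then "Reconnaissance"
     else "General")
    = pvCats.getD (pvBest s) "General" := by
  have h0 := any_iff_M s 0 ["story", "harmonic", "song", "search", "ancient"] (by decide)
  have h1 := any_iff_M s 1 ["assault", "combat", "defense", "attack", "weapons", "training"] (by decide)
  have h2 := any_iff_M s 2 ["research", "analysis", "study", "survey", "specimen", "science"] (by decide)
  have h3 := any_iff_M s 3 ["escort", "transport", "delivery", "convoy"] (by decide)
  have h4 := any_iff_M s 4 ["patrol", "reconnaissance", "scout"] (by decide)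
  by_cases m0 : pvM s 0
  · have hb : pvBest s = 0 := Nat.le_zero.mp (pvBest_le s 0 m0)
    rw [h0.mpr m0, hb]; rfl
  · have e0 := Bool.eq_false_iff.mpr (fun h => m0 (h0.mp h))
    by_cases m1 : pvM s 1
    · have hb : pvBest s = 1 := le_antisymm (pvBest_le s 1 m1)
        (le_pvBest s 1 (by omega) (fun r' hr' => by interval_cases r'; exact m0))
      rw [e0, h1.mpr m1, hb]; rfl
    · have e1 := Bool.eq_false_iff.mpr (fun h => m1 (h1.mp h))
      by_cases m2 : pvM s 2
      · have hb : pvBest s = 2 := le_antisymm (pvBest_le s 2 m2)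
          (le_pvBest s 2 (by omega) (fun r' hr' => by interval_cases r' <;> assumption))
        rw [e0, e1, h2.mpr m2, hb]; rfl
      · have e2 := Bool.eq_false_iff.mpr (fun h => m2 (h2.mp h))
        by_cases m3 : pvM s 3
        · have hb : pvBest s = 3 := le_antisymm (pvBest_le s 3 m3)
            (le_pvBest s 3 (by omega) (fun r' hr' => by interval_cases r' <;> assumption))
          rw [e0, e1, e2, h3.mpr m3, hb]; rfl
        · have e3 := Bool.eq_false_iff.mpr (fun h => m3 (h3.mp h))
          by_cases m4 : pvM s 4
          · have hb : pvBest s = 4 := le_antisymm (pvBest_le s 4 m4)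
              (le_pvBest s 4 (by omega) (fun r' hr' => by interval_cases r' <;> assumption))
            rw [e0, e1, e2, e3, h4.mpr m4, hb]; rfl
          · have e4 := Bool.eq_false_iff.mpr (fun h => m4 (h4.mp h))
            have hb : pvBest s = 5 := le_antisymm (pvBest_le_five s)
              (le_pvBest s 5 (by omega) (fun r' hr' => by interval_cases r' <;> assumption))
            rw [e0, e1, e2, e3, e4, hb]; rfl

-- ===== VERDICT (by name: the statement is the Claim_ definition above) =====
theorem get_mission_category_py_spec : Claim_equal_get_mission_category_py := by
  intro mission_name _
  unfold Spec_get_mission_category_py get_mission_category_py get_mission_category_py_alt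
  simp only [PySem.Str.isIn_eq, best_eq]
  exact pvChain_eq ((PySem.Str.lower mission_name).toList)
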